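-- pv_equiv track=rewrite | github.com/miiiingyuuu/Algorithm | 백준/Gold/2143. 두 배열의 합/두 배열의 합.py | solve
-- ===== SOURCE A (Python) =====
-- from collections import Counter
--
-- def get_sums(lst):
--     n = len(lst)
--     sum_lst = []
--     for i in range(n):
--         total = 0
--         for j in range(i, n):
--             total += lst[j]
--             sum_lst.append(total)
--
--     return sum_lst
--
-- def solve(t, a, b):
--     # lst1과 lst2의 모든 부 배열 합 구하기
--     sum_lst1 = get_sums(a)
--     sum_lst2 = get_sums(b)
--
--     # lst1의 부배열 합 빈도수 세기
--     counter_lst1 = Counter(sum_lst1)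
--
--     # lst2의 부배열 합과 lst1의 것들의 합이 t가 되는 쌍 개수 세기(t - sum_lst2가 sum_lst1의 값이 되면 만족함)
--     cnt = 0
--     for i in sum_lst2:
--         cnt += counter_lst1[t - i]
--
--     return cnt
-- ===== SOURCE B (Python) =====
-- def _sub_sums(lst):
--     # prefix sums, then every contiguous-subarray sum as a difference of two prefixes
--     pre = [0]
--     for x in lst:
--         pre.append(pre[-1] + x)
--     n = len(lst)
--     return [pre[j] - pre[i] for i in range(n) for j in range(i + 1, n + 1)]
--
--
-- def _lower(s, x):
--     # first index of s (sorted ascending) whose element is >= x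
--     lo, hi = 0, len(s)
--     while lo < hi:
--         mid = (lo + hi) // 2
--         if s[mid] < x:
--             lo = mid + 1
--         else:
--             hi = mid
--     return lo
--
--
-- def _upper(s, x):
--     # first index of s (sorted ascending) whose element is > x
--     lo, hi = 0, len(s)
--     while lo < hi:
--         mid = (lo + hi) // 2
--         if s[mid] <= x:
--             lo = mid + 1
--         else:
--             hi = mid
--     return lo
--
--
-- def solve(t, a, b):
--     s1 = sorted(_sub_sums(a))
--     cnt = 0
--     for s in _sub_sums(b):
--         x = t - s
--         cnt += _upper(s1, x) - _lower(s1, x)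
--     return cnt
-- ===== Notes on version B (the rewrite author's own statement) =====
-- stated objective: alternative
-- what changed: Subarray sums are generated from prefix sums as pre[j]-pre[i] instead of the nested accumulating loop, and the Counter hash lookup is replaced by sorting one sum list and counting each needed value with a hand-written binary search (upper-lower bound difference).
import Mathlib
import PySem

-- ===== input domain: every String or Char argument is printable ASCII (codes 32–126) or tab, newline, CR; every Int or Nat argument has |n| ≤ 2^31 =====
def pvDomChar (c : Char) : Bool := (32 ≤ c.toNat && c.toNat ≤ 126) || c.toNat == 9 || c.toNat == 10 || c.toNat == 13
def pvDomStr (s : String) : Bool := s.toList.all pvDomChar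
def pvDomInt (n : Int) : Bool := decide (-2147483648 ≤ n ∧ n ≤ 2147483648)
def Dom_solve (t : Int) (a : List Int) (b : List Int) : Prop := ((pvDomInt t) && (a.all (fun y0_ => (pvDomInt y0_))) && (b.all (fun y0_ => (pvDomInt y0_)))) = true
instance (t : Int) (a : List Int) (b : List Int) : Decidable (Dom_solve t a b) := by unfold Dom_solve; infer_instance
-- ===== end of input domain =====

-- B replaces A's Counter hashing by sorting one sum list and counting with a hand-written
-- binary search, and generates the subarray sums from prefix sums; alternative, not faster.

-- ===== PORT A =====
-- get_sums: nested loops, running total appended each step (lst[j] via pyGetD, j always in range).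
def getSums (lst : List Int) : List Int :=
  let n : Int := lst.length
  (PySem.List.pyRange 0 n).foldl (fun sum_lst i =>
    ((PySem.List.pyRange i n).foldl
      (fun (st : Int × List Int) j =>
        let total := st.1 + PySem.List.pyGetD lst j 0
        (total, st.2 ++ [total]))
      (0, sum_lst)).2) []

def solve (t : Int) (a : List Int) (b : List Int) : Int :=
  let sum_lst1 := getSums a
  let sum_lst2 := getSums b
  let counter_lst1 := PySem.Dict.counter sum_lst1
  sum_lst2.foldl (fun cnt i => cnt + counter_lst1.getD (t - i) 0) 0

-- ===== PORT B =====
-- prefix sums: pre = [0]; for x in lst: pre.append(pre[-1] + x)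
def prefixSums (lst : List Int) : List Int :=
  lst.foldl (fun pre x => pre ++ [PySem.List.pyGetD pre (-1) 0 + x]) [0]

-- [pre[j] - pre[i] for i in range(n) for j in range(i+1, n+1)]
def subSums (lst : List Int) : List Int :=
  let pre := prefixSums lst
  let n : Int := lst.length
  (PySem.List.pyRange 0 n).flatMap (fun i =>
    (PySem.List.pyRange (i + 1) (n + 1)).map (fun j =>
      PySem.List.pyGetD pre j 0 - PySem.List.pyGetD pre i 0))

-- _lower's while-loop as recursion on (lo, hi)
-- fuel = number of remaining loop iterations + 1 (a totality guard only; the loop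
-- halves hi - lo each step, so s.length + 1 fuel at the call site is never exhausted)
def lowerAux (s : List Int) (x : Int) : Nat → Int → Int → Int
  | 0, lo, _ => lo
  | fuel + 1, lo, hi =>
    if lo < hi then
      let mid := PySem.Int.floordiv (lo + hi) 2
      if PySem.List.pyGetD s mid 0 < x then lowerAux s x fuel (mid + 1) hi
      else lowerAux s x fuel lo mid
    else lo

-- _upper's while-loop as recursion on (lo, hi)
def upperAux (s : List Int) (x : Int) : Nat → Int → Int → Int
  | 0, lo, _ => lo
  | fuel + 1, lo, hi =>
    if lo < hi then
      let mid := PySem.Int.floordiv (lo + hi) 2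
      if PySem.List.pyGetD s mid 0 ≤ x then upperAux s x fuel (mid + 1) hi
      else upperAux s x fuel lo mid
    else lo

def solve_alt (t : Int) (a : List Int) (b : List Int) : Int :=
  let s1 := PySem.List.sorted (subSums a) (fun x => x)
  (subSums b).foldl (fun cnt s =>
    cnt + (upperAux s1 (t - s) (s1.length + 1) 0 s1.length
      - lowerAux s1 (t - s) (s1.length + 1) 0 s1.length)) 0

-- ===== PRECONDITION & SPEC =====
def Spec_solve (t : Int) (a : List Int) (b : List Int) (out : Int) : Prop := out = solve_alt t a b
instance (t : Int) (a : List Int) (b : List Int) (out : Int) : Decidable (Spec_solve t a b out) := by unfold Spec_solve; infer_instance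

-- ===== CLAIM (what is proved, stated in full; the proofs are below) =====
def Claim_equal_solve : Prop := ∀ (t : Int) (a : List Int) (b : List Int), Dom_solve t a b → Spec_solve t a b (solve t a b)

-- ===== LEMMAS AND PROOFS =====

-- prefix sum of the first k elements
def pfx (lst : List Int) (k : Nat) : Int := ((lst.take k).sum : Int)

-- common normal form of both sum-list generators
def specSums (lst : List Int) : List Int :=
  (List.range lst.length).flatMap (fun i =>
    (List.range (lst.length - i)).map (fun k => pfx lst (i + k + 1) - pfx lst i))

lemma pfx_succ (lst : List Int) (k : Nat) (h : k < lst.length) :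
    pfx lst (k + 1) = pfx lst k + lst[k] := by
  unfold pfx
  rw [List.take_succ, List.getElem?_eq_getElem h, Option.toList_some, List.sum_append,
    List.sum_cons, List.sum_nil]
  ring

lemma getSums_inner (lst : List Int) (i K : Nat) (hK : i + K ≤ lst.length)
    (c : Int) (acc : List Int) :
    ((List.range K).map (fun k => ((i + k : Nat) : Int))).foldl
      (fun (st : Int × List Int) j =>
        let total := st.1 + PySem.List.pyGetD lst j 0
        (total, st.2 ++ [total]))
      (c, acc)
    = (c + (pfx lst (i + K) - pfx lst i),
       acc ++ (List.range K).map (fun k => c + (pfx lst (i + k + 1) - pfx lst i))) := by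
  induction K with
  | zero => simp [pfx]
  | succ K ih =>
      rw [List.range_succ, List.map_append, List.foldl_append, ih (by omega)]
      have hik : i + K < lst.length := by omega
      have hnat : i + (K + 1) = (i + K) + 1 := by omega
      simp only [List.map_append, List.foldl_cons, List.foldl_nil, List.map_cons, List.map_nil]
      rw [PySem.List.pyGetD_natCast, List.getD_eq_getElem _ _ hik, hnat, pfx_succ lst (i + K) hik]
      rw [Prod.mk.injEq]
      constructor
      · ring
      · rw [List.append_assoc]
        congr 2
        ring

lemma pyRange_shift (i n : Nat) (h : i ≤ n) :
    PySem.List.pyRange (i : Int) (n : Int) = (List.range (n - i)).map (fun k => ((i + k : Nat) : Int)) := by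
  rw [PySem.List.pyRange_of_pos _ _ (by norm_num : (0:Int) < 1)]
  by_cases hlt : i < n
  · rw [if_pos (by exact_mod_cast hlt)]
    have harg : (((n : Int) - i + 1 - 1) / 1).toNat = n - i := by omega
    rw [harg]
    apply List.map_congr_left
    intro k _
    push_cast
    ring
  · have : n - i = 0 := by omega
    rw [if_neg (by exact_mod_cast hlt), this]
    simp

lemma getSums_outer (lst : List Int) : ∀ (m : Nat), m ≤ lst.length → ∀ (acc : List Int),
    ((List.range m).map (fun k : Nat => (k : Int))).foldl
      (fun sum_lst i =>
        ((PySem.List.pyRange i (lst.length : Int)).foldl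
          (fun (st : Int × List Int) j =>
            let total := st.1 + PySem.List.pyGetD lst j 0
            (total, st.2 ++ [total])) (0, sum_lst)).2) acc
    = acc ++ (List.range m).flatMap (fun i =>
        (List.range (lst.length - i)).map (fun k => pfx lst (i + k + 1) - pfx lst i)) := by
  intro m
  induction m with
  | zero => simp
  | succ m ih =>
      intro hm acc
      rw [List.range_succ, List.map_append, List.foldl_append, ih (by omega) acc]
      simp only [List.map_cons, List.map_nil, List.foldl_cons, List.foldl_nil]
      rw [pyRange_shift m lst.length (by omega),
        getSums_inner lst m (lst.length - m) (by omega) 0 _]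
      dsimp only
      rw [List.flatMap_append, List.flatMap_cons, List.flatMap_nil, List.append_nil,
        ← List.append_assoc]
      congr 1
      apply List.map_congr_left
      intro k _
      ring

lemma getSums_eq_specSums (lst : List Int) : getSums lst = specSums lst := by
  unfold getSums specSums
  dsimp only
  rw [PySem.List.pyRange_zero_natCast]
  have h := getSums_outer lst lst.length le_rfl []
  simpa using h

lemma prefixSums_aux (xs : List Int) : ∀ (front : List Int) (s : Int),
    xs.foldl (fun pre x => pre ++ [PySem.List.pyGetD pre (-1) 0 + x]) (front ++ [s])
    = front ++ [s] ++ (List.range xs.length).map (fun k => s + (xs.take (k + 1)).sum) := by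
  induction xs with
  | nil => simp
  | cons x xs ih =>
      intro front s
      have hlast : PySem.List.pyGetD (front ++ [s]) (-1) 0 = s := by
        simp [PySem.List.pyGetD]
      simp only [List.foldl_cons, hlast]
      rw [show (front ++ [s]) ++ [s + x] = (front ++ [s]) ++ [s + x] from rfl,
        ih (front ++ [s]) (s + x)]
      rw [List.length_cons, List.range_succ_eq_map, List.map_cons, List.map_map]
      rw [List.append_assoc (front ++ [s]), List.singleton_append]
      congr 1
      congr 1
      · simp
      · apply List.map_congr_left
        intro k _
        simp [Function.comp, List.take_succ_cons]
        ring

lemma prefixSums_eq (lst : List Int) :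
    prefixSums lst = (List.range (lst.length + 1)).map (fun k => pfx lst k) := by
  unfold prefixSums
  rw [show ([0] : List Int) = [] ++ [0] from rfl, prefixSums_aux lst [] 0]
  rw [List.range_succ_eq_map, List.map_cons, List.map_map]
  simp only [List.nil_append, List.singleton_append]
  refine List.cons_eq_cons.mpr ⟨by simp [pfx], ?_⟩
  apply List.map_congr_left
  intro k _
  simp [pfx, Function.comp]

lemma prefixSums_get (lst : List Int) (j : Nat) (hj : j ≤ lst.length) :
    PySem.List.pyGetD (prefixSums lst) (j : Int) 0 = pfx lst j := by
  rw [PySem.List.pyGetD_natCast, prefixSums_eq]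
  rw [List.getD_eq_getElem _ _ (by simp; omega)]
  simp

lemma subSums_eq_specSums (lst : List Int) : subSums lst = specSums lst := by
  unfold subSums specSums
  dsimp only
  rw [PySem.List.pyRange_zero_natCast, List.flatMap_map]
  apply List.flatMap_congr
  intro i hi
  have hin : i < lst.length := List.mem_range.1 hi
  have hsh : PySem.List.pyRange ((i : Int) + 1) ((lst.length : Int) + 1)
      = (List.range (lst.length - i)).map (fun k => (((i + 1) + k : Nat) : Int)) := by
    have := pyRange_shift (i + 1) (lst.length + 1) (by omega)
    have harg : lst.length + 1 - (i + 1) = lst.length - i := by omega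
    rw [harg] at this
    rw [← this]
    push_cast
    ring_nf
  rw [hsh, List.map_map]
  apply List.map_congr_left
  intro k hk
  have hkn : k < lst.length - i := List.mem_range.1 hk
  simp only [Function.comp]
  rw [show ((i + 1 + k : Nat) : Int) = ((i + k + 1 : Nat) : Int) from by push_cast; ring]
  rw [prefixSums_get lst (i + k + 1) (by omega), prefixSums_get lst i (by omega)]

-- a list whose elements satisfy p exactly below index r has countP p = r
lemma countP_of_split (s : List Int) (p : Int → Bool) (r : Nat) (hr : r ≤ s.length)
    (h1 : ∀ (j : Nat) (hj : j < s.length), j < r → p s[j])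
    (h2 : ∀ (j : Nat) (hj : j < s.length), r ≤ j → p s[j] = false) :
    s.countP p = r := by
  conv_lhs => rw [← List.take_append_drop r s]
  rw [List.countP_append]
  have ht : (s.take r).countP p = (s.take r).length := by
    rw [List.countP_eq_length]
    intro y hy
    obtain ⟨i, hil, hie⟩ := List.getElem_of_mem hy
    have hil' : i < s.length := by
      have := List.length_take (i := r) (l := s); omega
    rw [List.getElem_take] at hie
    rw [← hie]
    exact h1 i hil' (by have := List.length_take (i := r) (l := s); omega)
  have hd : (s.drop r).countP p = 0 := by
    rw [List.countP_eq_zero]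
    intro y hy
    obtain ⟨i, hil, hie⟩ := List.getElem_of_mem hy
    have hil' : r + i < s.length := by
      have := List.length_drop (i := r) (l := s); omega
    rw [List.getElem_drop] at hie
    rw [← hie]
    simp [h2 (r + i) hil' (by omega)]
  rw [ht, hd, List.length_take]
  omega

lemma lowerAux_spec (s : List Int) (x : Int)
    (hmono : ∀ (q r : Nat) (hq : q < s.length) (hr : r < s.length), q ≤ r → s[q] ≤ s[r]) :
    ∀ (n : Nat) (lo hi : Int), (hi - lo).toNat < n → 0 ≤ lo → lo ≤ hi → hi ≤ s.length →
    (∀ (j : Nat) (hj : j < s.length), (j : Int) < lo → s[j] < x) →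
    (∀ (j : Nat) (hj : j < s.length), hi ≤ (j : Int) → x ≤ s[j]) →
    lowerAux s x n lo hi = ((s.countP (fun y => decide (y < x)) : Nat) : Int) := by
  intro n
  induction n with
  | zero =>
    intro lo hi hn h0 hlh hhl hlow hhigh
    omega
  | succ n ih =>
    intro lo hi hn h0 hlh hhl hlow hhigh
    rw [lowerAux]
    by_cases h : lo < hi
    · rw [if_pos h]
      have hmid := PySem.Int.floordiv_two_mid_bounds (le_of_lt h)
      have hmlt : PySem.Int.floordiv (lo + hi) 2 < hi :=
        (PySem.Int.floordiv_lt_iff_lt_mul (by norm_num)).2 (by omega)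
      set mid := PySem.Int.floordiv (lo + hi) 2 with hmiddef
      have hm0 : 0 ≤ mid := by omega
      have hmlen : mid < (s.length : Int) := by omega
      have hget : PySem.List.pyGetD s mid 0 = s[mid.toNat]'(by omega) :=
        PySem.List.pyGetD_eq_getElem s 0 hm0 hmlen
      by_cases hc : PySem.List.pyGetD s mid 0 < x
      · rw [if_pos hc]
        apply ih (mid + 1) hi (by omega) (by omega) (by omega) hhl
        · intro j hj hjlt
          calc s[j] ≤ s[mid.toNat]'(by omega) := hmono j mid.toNat hj (by omega) (by omega)
            _ < x := by rw [← hget]; exact hc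
        · exact hhigh
      · rw [if_neg hc]
        push_neg at hc
        rw [hget] at hc
        apply ih lo mid (by omega) h0 (by omega) (by omega) hlow
        intro j hj hjge
        calc x ≤ s[mid.toNat]'(by omega) := hc
          _ ≤ s[j] := hmono mid.toNat j (by omega) hj (by omega)
    · rw [if_neg h]
      have hlohi : lo = hi := by omega
      have := countP_of_split s (fun y => decide (y < x)) lo.toNat (by omega)
        (fun j hj hjr => by simp; exact hlow j hj (by omega))
        (fun j hj hjr => by simp; exact hhigh j hj (by omega))
      rw [this]
      omega

lemma upperAux_spec (s : List Int) (x : Int)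
    (hmono : ∀ (q r : Nat) (hq : q < s.length) (hr : r < s.length), q ≤ r → s[q] ≤ s[r]) :
    ∀ (n : Nat) (lo hi : Int), (hi - lo).toNat < n → 0 ≤ lo → lo ≤ hi → hi ≤ s.length →
    (∀ (j : Nat) (hj : j < s.length), (j : Int) < lo → s[j] ≤ x) →
    (∀ (j : Nat) (hj : j < s.length), hi ≤ (j : Int) → x < s[j]) →
    upperAux s x n lo hi = ((s.countP (fun y => decide (y ≤ x)) : Nat) : Int) := by
  intro n
  induction n with
  | zero =>
    intro lo hi hn h0 hlh hhl hlow hhigh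
    omega
  | succ n ih =>
    intro lo hi hn h0 hlh hhl hlow hhigh
    rw [upperAux]
    by_cases h : lo < hi
    · rw [if_pos h]
      have hmid := PySem.Int.floordiv_two_mid_bounds (le_of_lt h)
      have hmlt : PySem.Int.floordiv (lo + hi) 2 < hi :=
        (PySem.Int.floordiv_lt_iff_lt_mul (by norm_num)).2 (by omega)
      set mid := PySem.Int.floordiv (lo + hi) 2 with hmiddef
      have hm0 : 0 ≤ mid := by omega
      have hmlen : mid < (s.length : Int) := by omega
      have hget : PySem.List.pyGetD s mid 0 = s[mid.toNat]'(by omega) :=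
        PySem.List.pyGetD_eq_getElem s 0 hm0 hmlen
      by_cases hc : PySem.List.pyGetD s mid 0 ≤ x
      · rw [if_pos hc]
        apply ih (mid + 1) hi (by omega) (by omega) (by omega) hhl
        · intro j hj hjlt
          calc s[j] ≤ s[mid.toNat]'(by omega) := hmono j mid.toNat hj (by omega) (by omega)
            _ ≤ x := by rw [← hget]; exact hc
        · exact hhigh
      · rw [if_neg hc]
        push_neg at hc
        rw [hget] at hc
        apply ih lo mid (by omega) h0 (by omega) (by omega) hlow
        intro j hj hjge
        calc x < s[mid.toNat]'(by omega) := hc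
          _ ≤ s[j] := hmono mid.toNat j (by omega) hj (by omega)
    · rw [if_neg h]
      have hlohi : lo = hi := by omega
      have := countP_of_split s (fun y => decide (y ≤ x)) lo.toNat (by omega)
        (fun j hj hjr => by simp; exact hlow j hj (by omega))
        (fun j hj hjr => by simp; exact hhigh j hj (by omega))
      rw [this]
      omega

lemma countP_le_sub_lt (s : List Int) (x : Int) :
    s.countP (fun y => decide (y ≤ x)) = s.countP (fun y => decide (y < x)) + s.count x := by
  induction s with
  | nil => simp
  | cons y ys ih =>
      simp only [List.countP_cons, List.count_cons, ih, decide_eq_true_eq, beq_iff_eq]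
      split_ifs <;> omega

-- one term of B's loop counts exactly the occurrences of x in the subarray sums of a
lemma bisect_term (l : List Int) (x : Int) :
    upperAux (PySem.List.sorted l (fun y => y)) x ((PySem.List.sorted l (fun y => y)).length + 1) 0
        (PySem.List.sorted l (fun y => y)).length
      - lowerAux (PySem.List.sorted l (fun y => y)) x ((PySem.List.sorted l (fun y => y)).length + 1) 0
        (PySem.List.sorted l (fun y => y)).length
    = ((l.count x : Nat) : Int) := by
  set s := PySem.List.sorted l (fun y => y) with hs
  have hpw : List.Pairwise (fun a b : Int => a ≤ b) s := by
    have := PySem.List.sorted_pairwise l (fun y : Int => y)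
    simpa using this
  have hmono : ∀ (q r : Nat) (hq : q < s.length) (hr : r < s.length), q ≤ r → s[q] ≤ s[r] := by
    intro q r hq hr hqr
    rcases Nat.lt_or_ge q r with h | h
    · exact (List.pairwise_iff_getElem.1 hpw) q r hq hr h
    · have : q = r := by omega
      subst this; rfl
  have hlo := lowerAux_spec s x hmono (s.length + 1) 0 (s.length) (by omega)
    le_rfl (by omega) le_rfl (by intro j hj h; omega) (by intro j hj h; omega)
  have hhi := upperAux_spec s x hmono (s.length + 1) 0 (s.length) (by omega)
    le_rfl (by omega) le_rfl (by intro j hj h; omega) (by intro j hj h; omega)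
  rw [hlo, hhi]
  have hperm : s.Perm l := PySem.List.sorted_perm l (fun y => y) false
  rw [countP_le_sub_lt s x, hperm.count_eq x]
  push_cast
  ring

-- ===== VERDICT (by name: the statement is the Claim_ definition above) =====
theorem solve_spec : Claim_equal_solve := by
  intro t a b _
  unfold Spec_solve solve solve_alt
  dsimp only
  rw [PySem.List.foldl_add, PySem.List.foldl_add]
  rw [getSums_eq_specSums a, getSums_eq_specSums b, ← subSums_eq_specSums a,
    ← subSums_eq_specSums b]
  congr 1
  congr 1
  apply List.map_congr_left
  intro s _
  rw [PySem.Dict.getD_counter]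
  exact (bisect_term (subSums a) (t - s)).symm
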